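-- pv_equiv track=rewrite | github.com/JonathanVialpando/CS415Project1 | main.py | hsum
-- ===== SOURCE A (Python) =====
-- def gcd(p, q):
--     if q == 0:
--         return p
--     else:
--         return gcd(q, p % q)
--
-- def reduceFraction(p, q):
--     newGcd = gcd(p, q)
--     newP = p // newGcd
--     newQ = q // newGcd
--     return newP, newQ
--
-- def add(p1, q1, p2, q2):
--     denominator = q1 * q2
--     numerator = (p1 * q2) + (p2 * q1)
--     reduced = reduceFraction(numerator, denominator)
--     return reduced
--
-- def digitOfFraction(p, q, n):
--     remainder = p % q
--     count = 0
--     while count < n: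
--         remainder = remainder * 10
--         digit = remainder // q
--         remainder = remainder % q
--         count = count + 1
--     return digit
--
-- def hsum(n, m):
--     sum = (0, 1)
--     count = 0
--     while count < n:
--         sum = add(sum[0], sum[1], 1, count + 1)
--         count = count + 1
--     p = sum[0]
--     q = sum[1]
--     return digitOfFraction(p, q, m)
-- ===== SOURCE B (Python) =====
-- def hsum(n, m):
--     # Single common denominator (running n!), no per-step gcd reduction;
--     # the digit-extraction long division is the same as A's.
--     num = 0
--     den = 1
--     k = 1
--     while k <= n:
--         num = num * k + den
--         den = den * k
--         k = k + 1
--     remainder = num % den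
--     count = 0
--     while count < m:
--         remainder = remainder * 10
--         digit = remainder // den
--         remainder = remainder % den
--         count = count + 1
--     return digit
-- ===== Notes on version B (the rewrite author's own statement) =====
-- stated objective: faster
-- what changed: B accumulates the harmonic sum over one running common denominator (num = num*k + den, den = den*k) with no gcd/reduceFraction work at all, instead of A's per-term fraction addition that runs a recursive gcd reduction on ever-growing numbers; the digit long-division loop is kept as in A.
import Mathlib
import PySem

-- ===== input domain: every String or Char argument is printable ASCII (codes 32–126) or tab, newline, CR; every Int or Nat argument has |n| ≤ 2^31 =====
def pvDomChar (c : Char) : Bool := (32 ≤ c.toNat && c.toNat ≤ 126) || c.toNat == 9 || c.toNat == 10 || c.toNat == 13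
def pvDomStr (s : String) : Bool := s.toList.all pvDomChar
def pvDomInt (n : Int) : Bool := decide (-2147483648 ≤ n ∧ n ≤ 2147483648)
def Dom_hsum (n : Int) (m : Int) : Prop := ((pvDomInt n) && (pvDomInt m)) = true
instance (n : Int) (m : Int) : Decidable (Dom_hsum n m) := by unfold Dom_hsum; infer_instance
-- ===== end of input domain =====

-- B replaces A's per-step add-and-gcd-reduce fraction summation by a single running
-- common denominator (num*k+den, den*k) with no reduction, removing the per-term recursive gcd (objective: faster, measured).


-- ===== PORT A =====
-- gcd(p, q): Python's recursive gcd with Python's floor mod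
def pyGcd (p q : Int) : Int :=
  if h : q = 0 then p
  else pyGcd q (PySem.Int.mod p q)
termination_by q.natAbs
decreasing_by
  rcases lt_trichotomy q 0 with hq | hq | hq
  · have h1 := PySem.Int.mod_neg_bounds p hq
    omega
  · exact absurd hq h
  · have h1 := PySem.Int.mod_nonneg p hq
    have h2 := PySem.Int.mod_lt p hq
    omega

-- reduceFraction(p, q)
def pyReduceFraction (p q : Int) : Int × Int :=
  let newGcd := pyGcd p q
  let newP := PySem.Int.floordiv p newGcd
  let newQ := PySem.Int.floordiv q newGcd
  (newP, newQ)

-- add(p1, q1, p2, q2)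
def pyAdd (p1 q1 p2 q2 : Int) : Int × Int :=
  let denominator := q1 * q2
  let numerator := p1 * q2 + p2 * q1
  pyReduceFraction numerator denominator

-- digitOfFraction(p, q, n); `digit` is unbound in Python when the loop runs
-- 0 times (n ≤ 0 raises UnboundLocalError, excluded by Pre_); the port seeds it with 0.
def digitOfFraction (p q n : Int) : Int :=
  let st := (PySem.List.pyRange 0 n 1).foldl
    (fun (st : Int × Int) _ =>
      let remainder := st.1 * 10
      let digit := PySem.Int.floordiv remainder q
      (PySem.Int.mod remainder q, digit))
    (PySem.Int.mod p q, 0)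
  st.2

def hsum (n : Int) (m : Int) : Int :=
  let s := (PySem.List.pyRange 0 n 1).foldl
    (fun (s : Int × Int) count => pyAdd s.1 s.2 1 (count + 1)) (0, 1)
  digitOfFraction s.1 s.2 m

-- ===== PORT B =====
-- single common-denominator accumulation, then the same long-division digit loop
-- (`digit` likewise unbound in Python for m ≤ 0; seeded with 0, excluded by Pre_)
def hsum_alt (n : Int) (m : Int) : Int :=
  let s := (PySem.List.pyRange 1 (n + 1) 1).foldl
    (fun (s : Int × Int) k => (s.1 * k + s.2, s.2 * k)) (0, 1)
  let num := s.1
  let den := s.2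
  let st := (PySem.List.pyRange 0 m 1).foldl
    (fun (st : Int × Int) _ =>
      let remainder := st.1 * 10
      let digit := PySem.Int.floordiv remainder den
      (PySem.Int.mod remainder den, digit))
    (PySem.Int.mod num den, 0)
  st.2

-- ===== PRECONDITION & SPEC =====
-- For m ≤ 0 the digit loop never runs and Python's `digit` is unbound: A (and B)
-- raise UnboundLocalError there, so those inputs are excluded.
def Pre_hsum (n : Int) (m : Int) : Prop := 1 ≤ m
instance (n : Int) (m : Int) : Decidable (Pre_hsum n m) := by unfold Pre_hsum; infer_instance
def pvWitness_hsum : Int × Int := (5, 3)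

def Spec_hsum (n : Int) (m : Int) (out : Int) : Prop := out = hsum_alt n m
instance (n : Int) (m : Int) (out : Int) : Decidable (Spec_hsum n m out) := by unfold Spec_hsum; infer_instance

-- ===== CLAIM (what is proved, stated in full; the proofs are below) =====
def Claim_equal_hsum : Prop := ∀ (n : Int) (m : Int), Dom_hsum n m → Pre_hsum n m → Spec_hsum n m (hsum n m)

-- ===== LEMMAS AND PROOFS =====

lemma pyGcd_zero (p : Int) : pyGcd p 0 = p := by rw [pyGcd]; simp

lemma pyGcd_rec (p q : Int) (hq : q ≠ 0) :
    pyGcd p q = pyGcd q (PySem.Int.mod p q) := by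
  rw [pyGcd]; simp [hq]

-- the recursive gcd divides both arguments and is positive when q > 0
lemma pyGcd_spec (p q : Int) :
    pyGcd p q ∣ p ∧ pyGcd p q ∣ q ∧ (0 < q → 0 < pyGcd p q) := by
  induction p, q using pyGcd.induct with
  | case1 p => simp [pyGcd_zero]
  | case2 p q hq ih =>
    rw [pyGcd_rec p q hq]
    obtain ⟨d1, d2, hpos⟩ := ih
    refine ⟨?_, d1, fun hq0 => ?_⟩
    · have e := PySem.Int.floordiv_mul_add_mod p q
      obtain ⟨c1, hc1⟩ := d1
      obtain ⟨c2, hc2⟩ := d2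
      exact ⟨PySem.Int.floordiv p q * c1 + c2,
        by linear_combination (-1 : ℤ) * e + PySem.Int.floordiv p q * hc1 + hc2⟩
    · have h1 := PySem.Int.mod_nonneg p hq0
      rcases h1.lt_or_eq with hlt | heq
    -- mod > 0: recursive positivity; mod = 0: pyGcd q 0 = q > 0
      · exact hpos hlt
      · rw [← heq, pyGcd_zero]; exact hq0

-- floor division and remainder depend only on the rational value of the fraction
lemma cross_div_mod (q d a b : Int) (hq : 0 < q) (hd : 0 < d) (h : a * d = b * q) :
    PySem.Int.floordiv b d = PySem.Int.floordiv a q ∧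
    PySem.Int.mod a q * d = PySem.Int.mod b d * q := by
  set t := PySem.Int.floordiv a q with ht
  have e1 := PySem.Int.floordiv_mul_add_mod a q
  have hm1 := PySem.Int.mod_nonneg a hq
  have hm2 := PySem.Int.mod_lt a hq
  have s1 : t * q ≤ a := by linarith
  have s2 : a < (t + 1) * q := by nlinarith
  have u1 : t * d * q ≤ b * q := by nlinarith
  have u2 : b * q < (t + 1) * d * q := by nlinarith
  have hb1 : t * d ≤ b := le_of_mul_le_mul_right u1 hq
  have hb2 : b < (t + 1) * d := lt_of_mul_lt_mul_right u2 hq.le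
  have hfd : PySem.Int.floordiv b d = t :=
    (PySem.Int.floordiv_eq_iff_of_pos hd).mpr ⟨hb1, hb2⟩
  refine ⟨hfd, ?_⟩
  have e2 := PySem.Int.floordiv_mul_add_mod b d
  rw [hfd] at e2
  have hma : PySem.Int.mod a q = a - t * q := by linarith
  have hmb : PySem.Int.mod b d = b - t * d := by linarith
  rw [hma, hmb]; nlinarith

-- the digit loop produces the same digit from any two value-equal fractions
lemma digitLoop_congr (L : List Int) (q d : Int) (hq : 0 < q) (hd : 0 < d) :
    ∀ a b dig, a * d = b * q →
    (L.foldl (fun (st : Int × Int) _ =>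
        (PySem.Int.mod (st.1 * 10) q, PySem.Int.floordiv (st.1 * 10) q)) (a, dig)).2
    = (L.foldl (fun (st : Int × Int) _ =>
        (PySem.Int.mod (st.1 * 10) d, PySem.Int.floordiv (st.1 * 10) d)) (b, dig)).2 := by
  induction L with
  | nil => intro a b dig _; rfl
  | cons x xs ih =>
    intro a b dig h
    have h10 : a * 10 * d = b * 10 * q := by linarith
    obtain ⟨hfd, hmod⟩ := cross_div_mod q d (a * 10) (b * 10) hq hd h10
    simp only [List.foldl_cons]
    rw [hfd]
    exact ih _ _ _ hmod

-- one step: A's add-and-reduce and B's common-denominator step stay value-equal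
lemma step_invariant (p q u d k : Int) (hq : 0 < q) (hd : 0 < d) (hk : 0 < k)
    (h : p * d = u * q) :
    0 < (pyAdd p q 1 k).2 ∧
    (pyAdd p q 1 k).1 * (d * k) = (u * k + d) * (pyAdd p q 1 k).2 := by
  unfold pyAdd pyReduceFraction
  simp only
  set num := p * k + 1 * q with hnum
  set den := q * k with hden
  have hden0 : 0 < den := mul_pos hq hk
  obtain ⟨g1, g2, g3⟩ := pyGcd_spec num den
  have hg : 0 < pyGcd num den := g3 hden0
  set g := pyGcd num den with hgdef
  obtain ⟨cn, hcn⟩ := g1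
  obtain ⟨cd, hcd⟩ := g2
  have hfn : PySem.Int.floordiv num g = cn := by
    rw [hcn, mul_comm]
    rw [PySem.Int.floordiv_eq_ediv_of_pos hg]
    exact Int.mul_ediv_cancel cn (by omega)
  have hfd : PySem.Int.floordiv den g = cd := by
    rw [hcd, mul_comm]
    rw [PySem.Int.floordiv_eq_ediv_of_pos hg]
    exact Int.mul_ediv_cancel cd (by omega)
  rw [hfn, hfd]
  constructor
  · -- 0 < cd since g * cd = den > 0 and g > 0
    nlinarith
  · -- cn * (d*k) = (u*k+d) * cd  ⇐  multiply both sides by g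
    have key : num * (d * k) = (u * k + d) * den := by
      rw [hnum, hden]; linear_combination (k * k) * h
    rw [hcn, hcd] at key
    have : g * (cn * (d * k)) = g * ((u * k + d) * cd) := by ring_nf; ring_nf at key; linarith
    exact mul_left_cancel₀ (by omega) this

-- the two summation loops, run over the same index list, keep value-equal states
lemma sum_invariant (L : List Int) :
    ∀ p q u d, (∀ x ∈ L, 0 ≤ x) → 0 < q → 0 < d → p * d = u * q →
    0 < (L.foldl (fun (s : Int × Int) c => pyAdd s.1 s.2 1 (c + 1)) (p, q)).2 ∧
    0 < (L.foldl (fun (s : Int × Int) c => (s.1 * (c + 1) + s.2, s.2 * (c + 1))) (u, d)).2 ∧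
    (L.foldl (fun (s : Int × Int) c => pyAdd s.1 s.2 1 (c + 1)) (p, q)).1 *
      (L.foldl (fun (s : Int × Int) c => (s.1 * (c + 1) + s.2, s.2 * (c + 1))) (u, d)).2 =
    (L.foldl (fun (s : Int × Int) c => (s.1 * (c + 1) + s.2, s.2 * (c + 1))) (u, d)).1 *
      (L.foldl (fun (s : Int × Int) c => pyAdd s.1 s.2 1 (c + 1)) (p, q)).2 := by
  induction L with
  | nil => intro p q u d _ hq hd h; exact ⟨hq, hd, h⟩
  | cons x xs ih =>
    intro p q u d hL hq hd h
    have hx : 0 ≤ x := hL x (List.mem_cons_self)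
    have hk : 0 < x + 1 := by omega
    obtain ⟨h1, h2⟩ := step_invariant p q u d (x + 1) hq hd hk h
    simp only [List.foldl_cons]
    exact ih _ _ _ _ (fun y hy => hL y (List.mem_cons_of_mem x hy)) h1
      (by positivity) h2

-- B's index list 1..n is A's index list 0..n-1 shifted by one
lemma pyRange_shift (n : Int) :
    PySem.List.pyRange 1 (n + 1) 1 = (PySem.List.pyRange 0 n 1).map (fun c => c + 1) := by
  rw [PySem.List.pyRange_one, PySem.List.pyRange_one, List.map_map]
  have : n + 1 - 1 = n - 0 := by ring
  rw [this]
  exact List.map_congr_left (fun k _ => by simp [add_comm])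

-- ===== VERDICT (by name: the statement is the Claim_ definition above) =====
theorem hsum_spec : Claim_equal_hsum := by
  intro n m _ _
  unfold Spec_hsum hsum hsum_alt digitOfFraction
  rw [pyRange_shift, List.foldl_map]
  simp only
  set L := PySem.List.pyRange 0 n 1 with hL
  have hLpos : ∀ x ∈ L, 0 ≤ x := by
    intro x hx
    exact ((PySem.List.mem_pyRange_one).mp hx).1
  obtain ⟨hq, hd, hinv⟩ := sum_invariant L 0 1 0 1 hLpos one_pos one_pos (by ring)
  set sA := L.foldl (fun (s : Int × Int) c => pyAdd s.1 s.2 1 (c + 1)) (0, 1) with hsA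
  set sB := L.foldl (fun (s : Int × Int) c => (s.1 * (c + 1) + s.2, s.2 * (c + 1))) (0, 1) with hsB
  obtain ⟨_, hmod0⟩ := cross_div_mod sA.2 sB.2 sA.1 sB.1 hq hd hinv
  exact digitLoop_congr (PySem.List.pyRange 0 m 1) sA.2 sB.2 hq hd _ _ 0 hmod0
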